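-- pv_equiv track=rewrite | github.com/Leapense/problems | 16630번： Left and Right/Left and Right.py | lexicographically_earliest_order
-- ===== SOURCE A (Python) =====
-- def lexicographically_earliest_order(n, directions):
--     stack = []
--     result = []
--
--     for i in range(n):
--         if i < n - 1 and directions[i] == 'L':
--             stack.append(i + 1)
--         else:
--             stack.append(i + 1)
--             while stack:
--                 result.append(stack.pop())
--     return result
-- ===== SOURCE B (Python) =====
-- def lexicographically_earliest_order(n, directions):
--     # Pass 1 (right to left): ends[i] = index of the flush position ending i's run.
--     ends = []
--     e = 0
--     for i in range(n - 1, -1, -1):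
--         if not (i < n - 1 and directions[i] == 'L'):
--             e = i
--         ends.append(e)
--     ends.reverse()
--     # Pass 2 (left to right): each output value by the closed formula s + ends[i] + 1 - i.
--     result = []
--     s = 0
--     for i in range(n):
--         result.append(s + ends[i] + 1 - i)
--         if ends[i] == i:
--             s = i + 1
--     return result
-- ===== Notes on version B (the rewrite author's own statement) =====
-- stated objective: alternative
-- what changed: Replaces the stack/flush streaming pass by two staged passes: a right-to-left scan computing each position's run-end index, then a left-to-right pass that computes every output element directly by the closed formula s + ends[i] + 1 - i, with no reversal, no stack and no block emission.
import Mathlib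
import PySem

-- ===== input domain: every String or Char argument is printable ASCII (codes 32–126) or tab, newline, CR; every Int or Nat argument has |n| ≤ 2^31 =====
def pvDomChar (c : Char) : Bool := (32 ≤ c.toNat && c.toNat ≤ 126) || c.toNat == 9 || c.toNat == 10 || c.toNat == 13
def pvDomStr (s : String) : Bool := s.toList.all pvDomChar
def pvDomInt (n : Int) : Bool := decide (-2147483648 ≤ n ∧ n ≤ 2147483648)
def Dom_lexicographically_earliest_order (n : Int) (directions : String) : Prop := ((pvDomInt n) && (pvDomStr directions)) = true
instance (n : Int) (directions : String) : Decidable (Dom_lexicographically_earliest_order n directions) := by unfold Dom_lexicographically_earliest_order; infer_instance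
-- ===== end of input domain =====

-- B replaces A's stack/flush streaming pass by two staged passes: a right-to-left scan of run-end
-- indices, then a left-to-right pass computing each element by the closed formula s + ends[i] + 1 - i
-- (objective: alternative).

-- ===== PORT A =====
-- the inner 'while stack: result.append(stack.pop())' (stack top = list head here)
def pvDrainA : List Int → List Int → List Int
  | [], res => res
  | x :: s, res => pvDrainA s (res ++ [x])

def lexicographically_earliest_order (n : Int) (directions : String) : List Int :=
  ((PySem.List.pyRange 0 n 1).foldl
    (fun (st : List Int × List Int) (i : Int) =>
      if i < n - 1 ∧ PySem.Str.pyGet? directions i = some 'L' then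
        ((i + 1) :: st.1, st.2)
      else
        ([], pvDrainA ((i + 1) :: st.1) st.2))
    ([], [])).2

-- ===== PORT B =====
-- pass 1 builds 'ends' by appending then reversing; pass 2 indexes it with ends[i]
-- (always in range for 0 ≤ i < n, so pyGetD with default 0 is exact here).
def lexicographically_earliest_order_alt (n : Int) (directions : String) : List Int :=
  let ends :=
    (((PySem.List.pyRange (n - 1) (-1) (-1)).foldl
        (fun (st : List Int × Int) (i : Int) =>
          let e := if ¬ (i < n - 1 ∧ PySem.Str.pyGet? directions i = some 'L') then i else st.2
          (st.1 ++ [e], e))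
        ([], 0)).1).reverse
  ((PySem.List.pyRange 0 n 1).foldl
    (fun (st : List Int × Int) (i : Int) =>
      let v := st.1 ++ [st.2 + PySem.List.pyGetD ends i 0 + 1 - i]
      if PySem.List.pyGetD ends i 0 = i then (v, i + 1) else (v, st.2))
    ([], 0)).1

-- ===== PRECONDITION & SPEC =====
-- Pre_ excludes exactly the inputs where Python A (and B alike) raises IndexError: directions[i] is
-- accessed for i ≤ n-2, so A returns normally iff n - 1 ≤ len(directions).
def Pre_lexicographically_earliest_order (n : Int) (directions : String) : Prop :=
  n - 1 ≤ (directions.toList.length : Int)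
instance (n : Int) (directions : String) : Decidable (Pre_lexicographically_earliest_order n directions) := by unfold Pre_lexicographically_earliest_order; infer_instance
def pvWitness_lexicographically_earliest_order : Int × String := (5, "LLRL")
def Spec_lexicographically_earliest_order (n : Int) (directions : String) (out : List Int) : Prop := out = lexicographically_earliest_order_alt n directions
instance (n : Int) (directions : String) (out : List Int) : Decidable (Spec_lexicographically_earliest_order n directions out) := by unfold Spec_lexicographically_earliest_order; infer_instance

-- ===== CLAIM (what is proved, stated in full; the proofs are below) =====
def Claim_equal_lexicographically_earliest_order : Prop := ∀ (n : Int) (directions : String), Dom_lexicographically_earliest_order n directions → Pre_lexicographically_earliest_order n directions → Spec_lexicographically_earliest_order n directions (lexicographically_earliest_order n directions)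

-- ===== LEMMAS AND PROOFS =====

theorem pvDrainA_eq_append : ∀ (s res : List Int), pvDrainA s res = res ++ s
  | [], res => by simp [pvDrainA]
  | x :: s, res => by simp [pvDrainA, pvDrainA_eq_append s]

-- the common "start marker + flush block" loop both programs are reduced to
def pvStepM (n : Int) (d : String) (st : List Int × Int) (i : Int) : List Int × Int :=
  if i < n - 1 ∧ PySem.Str.pyGet? d i = some 'L' then st
  else (st.1 ++ PySem.List.pyRange (i + 1) st.2 (-1), i + 1)

-- nf f i: the first flush index ≥ i, computed with fuel f
def pvNf (n : Int) (d : String) : Nat → Int → Int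
  | 0, i => i
  | f + 1, i => if i < n - 1 ∧ PySem.Str.pyGet? d i = some 'L' then pvNf n d f (i + 1) else i

def pvNfix (n : Int) (d : String) (i : Int) : Int := pvNf n d (n - 1 - i).toNat i

-- B's forward pass, with the ends-table lookup replaced by pvNfix
def pvStepB (n : Int) (d : String) (st : List Int × Int) (i : Int) : List Int × Int :=
  let v := st.1 ++ [st.2 + pvNfix n d i + 1 - i]
  if pvNfix n d i = i then (v, i + 1) else (v, st.2)

theorem pvNfix_rec (n : Int) (d : String) (i : Int) (_h : i < n) :
    pvNfix n d i =
      if i < n - 1 ∧ PySem.Str.pyGet? d i = some 'L' then pvNfix n d (i + 1) else i := by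
  by_cases hc : i < n - 1 ∧ PySem.Str.pyGet? d i = some 'L'
  · have hfuel : (n - 1 - i).toNat = (n - 1 - (i + 1)).toNat + 1 := by omega
    rw [if_pos hc]
    unfold pvNfix
    rw [hfuel]
    simp only [pvNf, if_pos hc]
  · rw [if_neg hc]
    unfold pvNfix
    cases hf : (n - 1 - i).toNat with
    | zero => simp [pvNf]
    | succ f => simp only [pvNf]; rw [if_neg hc]

theorem pvNfix_spec (n : Int) (d : String) : ∀ (f : Nat) (i : Int),
    (n - 1 - i).toNat = f → 0 ≤ i → i < n →
    i ≤ pvNfix n d i ∧ pvNfix n d i < n ∧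
    ¬ (pvNfix n d i < n - 1 ∧ PySem.Str.pyGet? d (pvNfix n d i) = some 'L') ∧
    ∀ j, i ≤ j → j < pvNfix n d i → (j < n - 1 ∧ PySem.Str.pyGet? d j = some 'L') := by
  intro f
  induction f with
  | zero =>
    intro i hf h0 h1
    have hni : ¬ (i < n - 1 ∧ PySem.Str.pyGet? d i = some 'L') := fun h => by omega
    have hx : pvNfix n d i = i := by rw [pvNfix_rec n d i h1, if_neg hni]
    rw [hx]
    exact ⟨le_refl _, h1, hni, fun j hj1 hj2 => absurd hj2 (by omega)⟩
  | succ f ih =>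
    intro i hf h0 h1
    by_cases hc : i < n - 1 ∧ PySem.Str.pyGet? d i = some 'L'
    · have hx : pvNfix n d i = pvNfix n d (i + 1) := by rw [pvNfix_rec n d i h1, if_pos hc]
      obtain ⟨a, b, c, dd⟩ := ih (i + 1) (by omega) (by omega) (by omega)
      rw [hx]
      refine ⟨by omega, b, c, fun j hj1 hj2 => ?_⟩
      rcases eq_or_lt_of_le hj1 with heq | hlt
      · exact heq ▸ hc
      · exact dd j (by omega) hj2
    · have hx : pvNfix n d i = i := by rw [pvNfix_rec n d i h1, if_neg hc]
      rw [hx]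
      exact ⟨le_refl _, h1, hc, fun j hj1 hj2 => absurd hj2 (by omega)⟩

theorem pvNfix_const (n : Int) (d : String) (e : Int)
    (he : ¬ (e < n - 1 ∧ PySem.Str.pyGet? d e = some 'L')) (hen : e < n) :
    ∀ (m : Nat) (j : Int), j + (m : Int) = e → j < n →
    (∀ i, j ≤ i → i < e → (i < n - 1 ∧ PySem.Str.pyGet? d i = some 'L')) →
    pvNfix n d j = e := by
  intro m
  induction m with
  | zero =>
    intro j hm hj _
    have : j = e := by omega
    subst this
    rw [pvNfix_rec n d j hj, if_neg he]
  | succ m ih =>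
    intro j hm hj hin
    have hc := hin j (le_refl _) (by omega)
    rw [pvNfix_rec n d j hj, if_pos hc]
    exact ih (j + 1) (by omega) (by omega) (fun i h1 h2 => hin i (by omega) h2)

-- the simulation of A: the stack is always a countdown range from the last index to the run start
theorem pv_sim (n : Int) (d : String) :
    ∀ (m : Nat) (k start : Int) (res : List Int), start ≤ k →
    ((PySem.List.pyRange k (k + m) 1).foldl
      (fun (st : List Int × List Int) (i : Int) =>
        if i < n - 1 ∧ PySem.Str.pyGet? d i = some 'L' then
          ((i + 1) :: st.1, st.2)
        else
          ([], pvDrainA ((i + 1) :: st.1) st.2))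
      (PySem.List.pyRange k start (-1), res)).2
    = ((PySem.List.pyRange k (k + m) 1).foldl (pvStepM n d) (res, start)).1 := by
  intro m
  induction m with
  | zero =>
    intro k start res h
    simp
  | succ m ih =>
    intro k start res h
    rw [PySem.List.pyRange_one_cons (by push_cast; omega : k < k + ((m + 1 : Nat) : Int))]
    simp only [List.foldl_cons, pvStepM]
    have hcons : PySem.List.pyRange (k + 1) start (-1) = (k + 1) :: PySem.List.pyRange k start (-1) := by
      rw [PySem.List.pyRange_neg_one_cons (by omega : start < k + 1)]; norm_num
    by_cases hc : k < n - 1 ∧ PySem.Str.pyGet? d k = some 'L'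
    · rw [if_pos hc, if_pos hc]
      rw [← hcons]
      have := ih (k + 1) start res (by omega)
      rw [show k + ((m + 1 : Nat) : Int) = (k + 1) + (m : Int) by push_cast; ring]
      exact this
    · rw [if_neg hc, if_neg hc]
      rw [pvDrainA_eq_append, ← hcons]
      have := ih (k + 1) (k + 1) (res ++ PySem.List.pyRange (k + 1) start (-1)) (le_refl _)
      rw [show k + ((m + 1 : Nat) : Int) = (k + 1) + (m : Int) by push_cast; ring]
      rw [PySem.List.pyRange_neg_one_eq_nil (le_refl (k + 1))] at this
      exact this

-- the backward pass computes exactly pvNfix at every index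
theorem pvEnds (n : Int) (d : String) : ∀ (m : Nat) (lst : List Int) (e0 : Int),
    (m : Int) ≤ n → ((m : Int) < n → e0 = pvNfix n d m) →
    ((PySem.List.pyRange ((m : Int) - 1) (-1) (-1)).foldl
      (fun (st : List Int × Int) (i : Int) =>
        let e := if ¬ (i < n - 1 ∧ PySem.Str.pyGet? d i = some 'L') then i else st.2
        (st.1 ++ [e], e))
      (lst, e0)).1
    = lst ++ ((PySem.List.pyRange 0 (m : Int) 1).map (pvNfix n d)).reverse := by
  intro m
  induction m with
  | zero =>
    intro lst e0 _ _
    simp [PySem.List.pyRange_neg_one_eq_nil (le_refl (-1 : Int)),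
      PySem.List.pyRange_one_eq_nil (le_refl (0 : Int))]
  | succ m ih =>
    intro lst e0 hle h0
    have hc1 : ((m + 1 : Nat) : Int) = (m : Int) + 1 := by push_cast; ring
    rw [hc1] at hle h0 ⊢
    rw [show (m : Int) + 1 - 1 = (m : Int) by ring,
      PySem.List.pyRange_neg_one_cons (by omega : (-1 : Int) < (m : Int)),
      List.foldl_cons]
    have hmn : (m : Int) < n := by omega
    have hstep :
        (let e := if ¬ ((m : Int) < n - 1 ∧ PySem.Str.pyGet? d (m : Int) = some 'L') then (m : Int) else (lst, e0).2
         ((lst, e0).1 ++ [e], e))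
        = (lst ++ [pvNfix n d m], pvNfix n d m) := by
      show (lst ++ [if ¬ ((m : Int) < n - 1 ∧ PySem.Str.pyGet? d m = some 'L') then (m : Int) else e0],
        if ¬ ((m : Int) < n - 1 ∧ PySem.Str.pyGet? d m = some 'L') then (m : Int) else e0)
        = (lst ++ [pvNfix n d m], pvNfix n d m)
      by_cases hc : (m : Int) < n - 1 ∧ PySem.Str.pyGet? d m = some 'L'
      · have hx : pvNfix n d m = pvNfix n d ((m : Int) + 1) := by
          rw [pvNfix_rec n d m hmn, if_pos hc]
        have he0 : e0 = pvNfix n d m := (h0 (by omega)).trans hx.symm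
        rw [if_neg (not_not_intro hc), he0]
      · have hx : pvNfix n d m = (m : Int) := by rw [pvNfix_rec n d m hmn, if_neg hc]
        rw [if_pos hc, hx]
    rw [hstep]
    rw [ih (lst ++ [pvNfix n d m]) (pvNfix n d m) (by omega) (fun _ => rfl)]
    rw [PySem.List.pyRange_one_succ_right (by omega : (0 : Int) ≤ (m : Int))]
    simp

-- M over one maximal run [k, e]: nothing happens until the flush at e, which emits the whole block
theorem pvRunM (n : Int) (d : String) : ∀ (m : Nat) (k s e : Int) (res : List Int),
    k + (m : Int) = e + 1 →
    (∀ j, k ≤ j → j < e → (j < n - 1 ∧ PySem.Str.pyGet? d j = some 'L')) →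
    ¬ (e < n - 1 ∧ PySem.Str.pyGet? d e = some 'L') →
    (PySem.List.pyRange k (e + 1) 1).foldl (pvStepM n d) (res, s)
      = if k ≤ e then (res ++ PySem.List.pyRange (e + 1) s (-1), e + 1) else (res, s) := by
  intro m
  induction m with
  | zero =>
    intro k s e res hm _ _
    rw [PySem.List.pyRange_one_eq_nil (by omega : e + 1 ≤ k), List.foldl_nil,
      if_neg (by omega : ¬ k ≤ e)]
  | succ m ih =>
    intro k s e res hm hin he
    rw [PySem.List.pyRange_one_cons (by omega : k < e + 1), List.foldl_cons]
    rcases eq_or_lt_of_le (show k ≤ e by omega) with heq | hlt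
    · subst heq
      simp only [pvStepM, if_neg he]
      rw [PySem.List.pyRange_one_eq_nil (le_refl (k + 1)), List.foldl_nil,
        if_pos (le_refl k)]
    · have hck := hin k (le_refl _) hlt
      simp only [pvStepM, if_pos hck]
      rw [ih (k + 1) s e res (by omega) (fun j h1 h2 => hin j (by omega) h2) he,
        if_pos (by omega : k + 1 ≤ e), if_pos (by omega : k ≤ e)]

-- B over one maximal run [k, e] (pvNfix ≡ e there): the formula emits the same block element-wise
theorem pvRunB (n : Int) (d : String) : ∀ (m : Nat) (k s e : Int) (res : List Int),
    k + (m : Int) = e + 1 →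
    (∀ j, k ≤ j → j ≤ e → pvNfix n d j = e) →
    (PySem.List.pyRange k (e + 1) 1).foldl (pvStepB n d) (res, s)
      = if k ≤ e then (res ++ PySem.List.pyRange (s + e + 1 - k) s (-1), e + 1) else (res, s) := by
  intro m
  induction m with
  | zero =>
    intro k s e res hm _
    rw [PySem.List.pyRange_one_eq_nil (by omega : e + 1 ≤ k), List.foldl_nil,
      if_neg (by omega : ¬ k ≤ e)]
  | succ m ih =>
    intro k s e res hm hnf
    rw [PySem.List.pyRange_one_cons (by omega : k < e + 1), List.foldl_cons]
    have hk := hnf k (le_refl _) (by omega)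
    rcases eq_or_lt_of_le (show k ≤ e by omega) with heq | hlt
    · subst heq
      simp only [pvStepB, hk]
      rw [if_pos trivial, PySem.List.pyRange_one_eq_nil (le_refl (k + 1)), List.foldl_nil,
        if_pos (le_refl k), show s + k + 1 - k = s + 1 by ring,
        PySem.List.pyRange_neg_one_cons (by omega : s < s + 1),
        show s + 1 - 1 = s by ring, PySem.List.pyRange_neg_one_eq_nil (le_refl s)]
    · simp only [pvStepB, hk, if_neg (by omega : ¬ e = k)]
      rw [ih (k + 1) s e (res ++ [s + e + 1 - k]) (by omega)
        (fun j h1 h2 => hnf j (by omega) h2), if_pos (by omega : k + 1 ≤ e),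
        if_pos (by omega : k ≤ e)]
      rw [PySem.List.pyRange_neg_one_cons (by omega : s < s + e + 1 - k),
        show s + e + 1 - k - 1 = s + e + 1 - (k + 1) by ring]
      simp

-- run-by-run: the M fold and the B fold from a common run start produce the same output list
theorem pvOuter (n : Int) (d : String) : ∀ (f : Nat) (s : Int) (res : List Int),
    (n - s).toNat = f → 0 ≤ s →
    ((PySem.List.pyRange s n 1).foldl (pvStepM n d) (res, s)).1
    = ((PySem.List.pyRange s n 1).foldl (pvStepB n d) (res, s)).1 := by
  intro f
  induction f using Nat.strong_induction_on with
  | _ f ih =>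
    intro s res hf hs
    by_cases hn : n ≤ s
    · simp [PySem.List.pyRange_one_eq_nil hn]
    · rw [not_le] at hn
      obtain ⟨h1, h2, h3, h4⟩ := pvNfix_spec n d ((n - 1 - s).toNat) s rfl hs hn
      have hconst : ∀ j, s ≤ j → j ≤ pvNfix n d s → pvNfix n d j = pvNfix n d s := by
        intro j hj1 hj2
        exact pvNfix_const n d (pvNfix n d s) h3 h2 ((pvNfix n d s) - j).toNat j (by omega)
          (by omega) (fun i hi1 hi2 => h4 i (by omega) hi2)
      rw [PySem.List.pyRange_one_append s (pvNfix n d s + 1) n (by omega) (by omega),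
        List.foldl_append, List.foldl_append]
      rw [pvRunM n d ((pvNfix n d s + 1 - s).toNat) s s (pvNfix n d s) res (by omega) h4 h3,
        pvRunB n d ((pvNfix n d s + 1 - s).toNat) s s (pvNfix n d s) res (by omega) hconst,
        if_pos h1, if_pos h1, show s + pvNfix n d s + 1 - s = pvNfix n d s + 1 by ring]
      exact ih ((n - (pvNfix n d s + 1)).toNat) (by omega) (pvNfix n d s + 1)
        (res ++ PySem.List.pyRange (pvNfix n d s + 1) s (-1)) rfl (by omega)

-- port A equals the M fold
theorem pvA_eq (n : Int) (d : String) :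
    lexicographically_earliest_order n d
    = ((PySem.List.pyRange 0 n 1).foldl (pvStepM n d) ([], 0)).1 := by
  unfold lexicographically_earliest_order
  by_cases hn : n ≤ 0
  · simp [PySem.List.pyRange_one_eq_nil hn]
  · have h0 : (0 : Int) + (n.toNat : Int) = n := by omega
    have := pv_sim n d n.toNat 0 0 [] (le_refl 0)
    rw [h0] at this
    rw [PySem.List.pyRange_neg_one_eq_nil (le_refl (0 : Int))] at this
    exact this

-- port B equals the B fold (ends-table lookups replaced by pvNfix)
theorem pvB_eq (n : Int) (d : String) :
    lexicographically_earliest_order_alt n d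
    = ((PySem.List.pyRange 0 n 1).foldl (pvStepB n d) ([], 0)).1 := by
  unfold lexicographically_earliest_order_alt
  by_cases hn : n ≤ 0
  · simp [PySem.List.pyRange_one_eq_nil hn]
  · have hends :
        (((PySem.List.pyRange (n - 1) (-1) (-1)).foldl
          (fun (st : List Int × Int) (i : Int) =>
            let e := if ¬ (i < n - 1 ∧ PySem.Str.pyGet? d i = some 'L') then i else st.2
            (st.1 ++ [e], e))
          ([], 0)).1).reverse
        = (PySem.List.pyRange 0 n 1).map (pvNfix n d) := by
      have hc : ((n.toNat : Nat) : Int) = n := by omega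
      have := pvEnds n d n.toNat ([] : List Int) 0 (by omega) (fun h => absurd h (by omega))
      rw [hc] at this
      rw [this]
      simp
    show (((PySem.List.pyRange 0 n 1).foldl
      (fun (st : List Int × Int) (i : Int) =>
        let v := st.1 ++ [st.2 + PySem.List.pyGetD
          ((((PySem.List.pyRange (n - 1) (-1) (-1)).foldl
            (fun (st : List Int × Int) (i : Int) =>
              let e := if ¬ (i < n - 1 ∧ PySem.Str.pyGet? d i = some 'L') then i else st.2
              (st.1 ++ [e], e)) ([], 0)).1).reverse) i 0 + 1 - i]
        if PySem.List.pyGetD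
          ((((PySem.List.pyRange (n - 1) (-1) (-1)).foldl
            (fun (st : List Int × Int) (i : Int) =>
              let e := if ¬ (i < n - 1 ∧ PySem.Str.pyGet? d i = some 'L') then i else st.2
              (st.1 ++ [e], e)) ([], 0)).1).reverse) i 0 = i then (v, i + 1) else (v, st.2))
      ([], 0)).1) = _
    rw [hends]
    congr 1
    apply PySem.List.foldl_congr_mem
    intro acc i hi
    obtain ⟨hi0, hi1⟩ := (PySem.List.mem_pyRange_one).mp hi
    simp only []
    rw [PySem.List.pyGetD_map_pyRange_of_nonneg (pvNfix n d) n i 0 hi0 hi1]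
    rfl

-- ===== VERDICT (by name: the statement is the Claim_ definition above) =====
theorem lexicographically_earliest_order_spec : Claim_equal_lexicographically_earliest_order := by
  intro n d _ _
  unfold Spec_lexicographically_earliest_order
  rw [pvA_eq, pvB_eq]
  exact pvOuter n d (n - 0).toNat 0 [] rfl (le_refl 0)
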